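-- pv_equiv track=rewrite | github.com/vshashankrao/CS440-Artificial-Intelligence | SolveProblem (8).py | find_intercept
-- ===== SOURCE A (Python) =====
-- def find_intercept(path1,path2):
--
--     for x,y in path1:
--         for j,k in path2:
--             if (x,y-1) == (j,k+1):
--                 return True
--             if (x,y+1) == (j,k-1):
--                 return True
--             if (x-1,y) == (j+1,k):
--                 return True
--             if (x+1,y) == (j-1,k):
--
--                 return True
--     return False
-- ===== SOURCE B (Python) =====
-- def find_intercept(path1, path2):
--     # Sort-and-merge intersection: the answer is True iff some path1 point
--     # coincides with a two-step translate of some path2 point. Build the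
--     # sorted distinct point lists and sweep them with two pointers.
--     a = sorted(set(path1))
--     b = sorted({(j + dx, k + dy)
--                 for j, k in path2
--                 for dx, dy in ((0, 2), (0, -2), (2, 0), (-2, 0))})
--     i = j = 0
--     while i < len(a) and j < len(b):
--         if a[i] == b[j]:
--             return True
--         if a[i] < b[j]:
--             i += 1
--         else:
--             j += 1
--     return False
-- ===== Notes on version B (the rewrite author's own statement) =====
-- stated objective: faster
-- what changed: Replaces the nested O(n*m) point-by-point scan with a sort-based sweep: sort the distinct path1 points and the distinct two-step translates of path2, then detect a common element with a single two-pointer merge.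
import Mathlib
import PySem

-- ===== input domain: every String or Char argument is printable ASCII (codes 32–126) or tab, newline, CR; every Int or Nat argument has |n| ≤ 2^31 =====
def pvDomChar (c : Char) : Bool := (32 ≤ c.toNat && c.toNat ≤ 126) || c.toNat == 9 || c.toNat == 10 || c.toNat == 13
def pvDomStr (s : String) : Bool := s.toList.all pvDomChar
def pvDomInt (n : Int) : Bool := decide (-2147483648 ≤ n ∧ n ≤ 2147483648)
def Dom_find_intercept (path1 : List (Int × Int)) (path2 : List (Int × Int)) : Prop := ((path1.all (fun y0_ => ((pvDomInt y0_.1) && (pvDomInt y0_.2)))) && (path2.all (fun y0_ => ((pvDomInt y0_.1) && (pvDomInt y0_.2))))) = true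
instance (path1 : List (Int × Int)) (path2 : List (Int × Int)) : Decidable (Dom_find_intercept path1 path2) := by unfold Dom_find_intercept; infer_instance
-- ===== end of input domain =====

-- B replaces A's nested O(n*m) scan by a sort-based sweep: sorted distinct
-- path1 points vs sorted distinct two-step translates of path2, intersected
-- by a two-pointer merge (objective: faster).

-- ===== PORT A =====
-- inner 'for j,k in path2' loop with its four early returns, in source order
def findInterceptInner (x y : Int) : List (Int × Int) → Bool
  | [] => false
  | (j, k) :: rest =>
    if (x, y - 1) = (j, k + 1) then true
    else if (x, y + 1) = (j, k - 1) then true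
    else if (x - 1, y) = (j + 1, k) then true
    else if (x + 1, y) = (j - 1, k) then true
    else findInterceptInner x y rest

def find_intercept (path1 : List (Int × Int)) (path2 : List (Int × Int)) : Bool :=
  match path1 with
  | [] => false
  | (x, y) :: rest =>
    if findInterceptInner x y path2 then true
    else find_intercept rest path2

-- ===== PORT B =====
-- Python's '<' on int pairs: lexicographic
def pairLt (p q : Int × Int) : Bool := p.1 < q.1 || (p.1 == q.1 && p.2 < q.2)

-- sorted(set(xs)): the strictly increasing list of the distinct elements,
-- built by ordered insertion that skips an element already present (exact:
-- that list is unique, so it equals Python's sorted(set(xs)))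
def insLex (x : Int × Int) : List (Int × Int) → List (Int × Int)
  | [] => [x]
  | y :: ys => if x = y then y :: ys
               else if pairLt x y then x :: y :: ys
               else y :: insLex x ys

def sortSetLex (xs : List (Int × Int)) : List (Int × Int) :=
  xs.foldl (fun acc p => insLex p acc) []

-- the two-pointer merge sweep ('while i < len(a) and j < len(b): …')
def mergeHit : List (Int × Int) → List (Int × Int) → Bool
  | [], _ => false
  | _ :: _, [] => false
  | x :: xs, y :: ys =>
    if x = y then true
    else if pairLt x y then mergeHit xs (y :: ys)
    else mergeHit (x :: xs) ys

def find_intercept_alt (path1 : List (Int × Int)) (path2 : List (Int × Int)) : Bool :=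
  let a := sortSetLex path1
  let b := sortSetLex (path2.flatMap (fun q =>
    [((0 : Int), (2 : Int)), (0, -2), (2, 0), (-2, 0)].map
      (fun d => (q.1 + d.1, q.2 + d.2))))
  mergeHit a b

-- ===== PRECONDITION & SPEC =====
def Spec_find_intercept (path1 : List (Int × Int)) (path2 : List (Int × Int)) (out : Bool) : Prop := out = find_intercept_alt path1 path2
instance (path1 : List (Int × Int)) (path2 : List (Int × Int)) (out : Bool) : Decidable (Spec_find_intercept path1 path2 out) := by unfold Spec_find_intercept; infer_instance

-- ===== CLAIM (what is proved, stated in full; the proofs are below) =====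
def Claim_equal_find_intercept : Prop := ∀ (path1 : List (Int × Int)) (path2 : List (Int × Int)), Dom_find_intercept path1 path2 → Spec_find_intercept path1 path2 (find_intercept path1 path2)

-- ===== LEMMAS AND PROOFS =====

-- order facts about pairLt
theorem pairLt_irrefl (x : Int × Int) : pairLt x x = false := by
  simp [pairLt]

theorem pairLt_asymm {x y : Int × Int} (h : pairLt x y = true) : pairLt y x = false := by
  obtain ⟨a, b⟩ := x; obtain ⟨c, d⟩ := y
  rw [Bool.eq_false_iff]
  intro h2
  simp [pairLt] at h h2
  omega

theorem pairLt_total {x y : Int × Int} (h : x ≠ y) : pairLt x y = true ∨ pairLt y x = true := by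
  obtain ⟨a, b⟩ := x; obtain ⟨c, d⟩ := y
  rw [Ne, Prod.mk.injEq, not_and_or] at h
  simp only [pairLt, Bool.or_eq_true, Bool.and_eq_true, decide_eq_true_eq, beq_iff_eq]
  omega

-- membership through ordered insertion
theorem mem_insLex (z x : Int × Int) (l : List (Int × Int)) :
    z ∈ insLex x l ↔ z = x ∨ z ∈ l := by
  induction l with
  | nil => simp [insLex]
  | cons y ys ih =>
    simp only [insLex]
    split_ifs with h1 h2
    · subst h1; simp [List.mem_cons]
    · simp [List.mem_cons]
    · simp [List.mem_cons, ih]; tauto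

-- ordered insertion keeps the list strictly increasing
theorem pairwise_insLex (x : Int × Int) (l : List (Int × Int))
    (hl : l.Pairwise (fun p q => pairLt p q = true)) :
    (insLex x l).Pairwise (fun p q => pairLt p q = true) := by
  induction l with
  | nil => simp [insLex]
  | cons y ys ih =>
    rw [List.pairwise_cons] at hl
    obtain ⟨hy, hys⟩ := hl
    simp only [insLex]
    split_ifs with h1 h2
    · exact List.pairwise_cons.mpr ⟨hy, hys⟩
    · refine List.pairwise_cons.mpr ⟨?_, List.pairwise_cons.mpr ⟨hy, hys⟩⟩
      intro z hz
      rcases List.mem_cons.mp hz with rfl | hz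
      · exact h2
      · -- pairLt x y and pairLt y z gives pairLt x z
        have hyz := hy _ hz
        obtain ⟨a, b⟩ := x; obtain ⟨c, d⟩ := y; obtain ⟨e, f⟩ := z
        simp only [pairLt, Bool.or_eq_true, Bool.and_eq_true, decide_eq_true_eq, beq_iff_eq] at h2 hyz ⊢
        omega
    · refine List.pairwise_cons.mpr ⟨?_, ih hys⟩
      intro z hz
      rcases (mem_insLex z x ys).mp hz with rfl | hz
      · rcases pairLt_total h1 with h | h
        · exact absurd h (by simp [h2])
        · exact h
      · exact hy _ hz

theorem sortSetLex_spec (xs : List (Int × Int)) :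
    (sortSetLex xs).Pairwise (fun p q => pairLt p q = true) ∧
    (∀ z, z ∈ sortSetLex xs ↔ z ∈ xs) := by
  suffices h : ∀ (acc : List (Int × Int)),
      acc.Pairwise (fun p q => pairLt p q = true) →
      (xs.foldl (fun acc p => insLex p acc) acc).Pairwise (fun p q => pairLt p q = true) ∧
      (∀ z, z ∈ xs.foldl (fun acc p => insLex p acc) acc ↔ z ∈ acc ∨ z ∈ xs) by
    have := h [] List.Pairwise.nil
    exact ⟨this.1, fun z => by simpa using (this.2 z)⟩
  induction xs with
  | nil => intro acc hacc; simpa using hacc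
  | cons p ps ih =>
    intro acc hacc
    have := ih (insLex p acc) (pairwise_insLex p acc hacc)
    refine ⟨this.1, fun z => ?_⟩
    rw [List.foldl_cons, (this.2 z), mem_insLex]
    simp [List.mem_cons]; tauto

-- a head smaller than the head of a strictly increasing list is not in it
theorem not_mem_of_lt_head {x y : Int × Int} {ys : List (Int × Int)}
    (hxy : pairLt x y = true)
    (hb : (y :: ys).Pairwise (fun p q => pairLt p q = true)) :
    x ∉ y :: ys := by
  intro hx
  rw [List.pairwise_cons] at hb
  rcases List.mem_cons.mp hx with rfl | hx
  · rw [pairLt_irrefl] at hxy; exact Bool.false_ne_true hxy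
  · have := hb.1 _ hx
    rw [pairLt_asymm this] at hxy
    exact Bool.false_ne_true hxy

-- the merge sweep finds exactly the common elements of two strictly increasing lists
theorem mergeHit_iff (a : List (Int × Int)) : ∀ (b : List (Int × Int)),
    a.Pairwise (fun p q => pairLt p q = true) →
    b.Pairwise (fun p q => pairLt p q = true) →
    (mergeHit a b = true ↔ ∃ z, z ∈ a ∧ z ∈ b) := by
  induction a with
  | nil => intro b _ _; simp [mergeHit]
  | cons x xs iha =>
    intro b
    induction b with
    | nil => intro _ _; simp [mergeHit]
    | cons y ys ihb =>
      intro ha hb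
      simp only [mergeHit]
      split_ifs with h1 h2
      · subst h1
        exact iff_of_true rfl ⟨x, List.mem_cons_self, List.mem_cons_self⟩
      · have hx : x ∉ y :: ys := not_mem_of_lt_head h2 hb
        rw [iha (y :: ys) (List.Pairwise.of_cons ha) hb]
        constructor
        · rintro ⟨z, hz1, hz2⟩; exact ⟨z, List.mem_cons_of_mem _ hz1, hz2⟩
        · rintro ⟨z, hz1, hz2⟩
          rcases List.mem_cons.mp hz1 with rfl | hz1
          · exact absurd hz2 hx
          · exact ⟨z, hz1, hz2⟩
      · have hyx : pairLt y x = true := by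
          rcases pairLt_total h1 with h | h
          · exact absurd h h2
          · exact h
        have hy : y ∉ x :: xs := not_mem_of_lt_head hyx ha
        rw [ihb ha (List.Pairwise.of_cons hb)]
        constructor
        · rintro ⟨z, hz1, hz2⟩; exact ⟨z, hz1, List.mem_cons_of_mem _ hz2⟩
        · rintro ⟨z, hz1, hz2⟩
          rcases List.mem_cons.mp hz2 with rfl | hz2
          · exact absurd hz1 hy
          · exact ⟨z, hz1, hz2⟩

-- A's inner scan decides 'the point (x,y) is a two-step translate of some path2 point'
theorem findInterceptInner_iff (x y : Int) (l : List (Int × Int)) :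
    findInterceptInner x y l = true ↔
      ∃ q ∈ l, (x, y) = (q.1, q.2 + 2) ∨ (x, y) = (q.1, q.2 - 2) ∨
               (x, y) = (q.1 + 2, q.2) ∨ (x, y) = (q.1 - 2, q.2) := by
  induction l with
  | nil => simp [findInterceptInner]
  | cons hd tl ih =>
    obtain ⟨j, k⟩ := hd
    simp only [findInterceptInner, List.mem_cons]
    constructor
    · intro h
      split_ifs at h with h1 h2 h3 h4
      · exact ⟨(j, k), Or.inl rfl, by simp [Prod.ext_iff] at h1 ⊢; omega⟩
      · exact ⟨(j, k), Or.inl rfl, by simp [Prod.ext_iff] at h2 ⊢; omega⟩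
      · exact ⟨(j, k), Or.inl rfl, by simp [Prod.ext_iff] at h3 ⊢; omega⟩
      · exact ⟨(j, k), Or.inl rfl, by simp [Prod.ext_iff] at h4 ⊢; omega⟩
      · obtain ⟨q, hq, hrel⟩ := ih.mp h; exact ⟨q, Or.inr hq, hrel⟩
    · rintro ⟨q, hq, hrel⟩
      split_ifs with h1 h2 h3 h4
      · rfl
      · rfl
      · rfl
      · rfl
      · apply ih.mpr
        rcases hq with rfl | hq
        · exfalso
          simp [Prod.ext_iff] at h1 h2 h3 h4 hrel
          omega
        · exact ⟨q, hq, hrel⟩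

-- A decides the existence of an interception pair
theorem find_intercept_iff (path1 path2 : List (Int × Int)) :
    find_intercept path1 path2 = true ↔
      ∃ p ∈ path1, ∃ q ∈ path2,
        p = (q.1, q.2 + 2) ∨ p = (q.1, q.2 - 2) ∨ p = (q.1 + 2, q.2) ∨ p = (q.1 - 2, q.2) := by
  induction path1 with
  | nil => simp [find_intercept]
  | cons hd tl ih =>
    obtain ⟨x, y⟩ := hd
    simp only [find_intercept, List.mem_cons]
    split_ifs with h
    · simp only [true_iff]
      obtain ⟨q, hq, hrel⟩ := (findInterceptInner_iff x y path2).mp h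
      exact ⟨(x, y), Or.inl rfl, q, hq, hrel⟩
    · rw [ih]
      constructor
      · rintro ⟨p, hp, hq⟩; exact ⟨p, Or.inr hp, hq⟩
      · rintro ⟨p, hp, hq⟩
        rcases hp with rfl | hp
        · exact absurd ((findInterceptInner_iff x y path2).mpr hq) (by simp [h])
        · exact ⟨p, hp, hq⟩

-- membership in B's candidate list is exactly A's interception relation
theorem mem_candidates (p : Int × Int) (path2 : List (Int × Int)) :
    (p ∈ path2.flatMap (fun q =>
      [((0 : Int), (2 : Int)), (0, -2), (2, 0), (-2, 0)].map
        (fun d => (q.1 + d.1, q.2 + d.2)))) ↔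
    ∃ q ∈ path2,
      p = (q.1, q.2 + 2) ∨ p = (q.1, q.2 - 2) ∨ p = (q.1 + 2, q.2) ∨ p = (q.1 - 2, q.2) := by
  obtain ⟨u, v⟩ := p
  simp only [List.mem_flatMap, List.mem_map, List.mem_cons, List.not_mem_nil, or_false]
  constructor
  · rintro ⟨q, hq, d, hd, hp⟩
    refine ⟨q, hq, ?_⟩
    rcases hd with rfl | rfl | rfl | rfl <;>
      simp only [Prod.ext_iff] at hp ⊢ <;> simp at hp <;> omega
  · rintro ⟨q, hq, h⟩
    rcases h with h | h | h | h
    · exact ⟨q, hq, (0, 2), Or.inl rfl,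
        by simp only [Prod.ext_iff] at h ⊢; simp; omega⟩
    · exact ⟨q, hq, (0, -2), Or.inr (Or.inl rfl),
        by simp only [Prod.ext_iff] at h ⊢; simp; omega⟩
    · exact ⟨q, hq, (2, 0), Or.inr (Or.inr (Or.inl rfl)),
        by simp only [Prod.ext_iff] at h ⊢; simp; omega⟩
    · exact ⟨q, hq, (-2, 0), Or.inr (Or.inr (Or.inr rfl)),
        by simp only [Prod.ext_iff] at h ⊢; simp; omega⟩

-- ===== VERDICT (by name: the statement is the Claim_ definition above) =====
theorem find_intercept_spec : Claim_equal_find_intercept := by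
  intro path1 path2 _
  unfold Spec_find_intercept find_intercept_alt
  have hA := find_intercept_iff path1 path2
  have h1 := sortSetLex_spec path1
  have h2 := sortSetLex_spec (path2.flatMap (fun q =>
    [((0 : Int), (2 : Int)), (0, -2), (2, 0), (-2, 0)].map
      (fun d => (q.1 + d.1, q.2 + d.2))))
  have hB := mergeHit_iff _ _ h1.1 h2.1
  rw [Bool.eq_iff_iff, hA, hB]
  constructor
  · rintro ⟨p, hp, hrel⟩
    exact ⟨p, (h1.2 p).mpr hp, (h2.2 p).mpr ((mem_candidates p path2).mpr hrel)⟩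
  · rintro ⟨z, hz1, hz2⟩
    exact ⟨z, (h1.2 z).mp hz1, (mem_candidates z path2).mp ((h2.2 z).mp hz2)⟩
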